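-- pv_equiv track=rewrite | github.com/Hrishikesh332/automodelling | prepare.py | inferTargetWithoutGoal
-- ===== SOURCE A (Python) =====
-- COMMON_TARGET_NAMES = [
--     "target",
--     "label",
--     "class",
--     "y",
--     "outcome",
--     "response",
--     "churn",
--     "default",
--     "price",
--     "sale_price",
--     "revenue",
-- ]
--
-- def inferTargetWithoutGoal(columns: list[str]) -> tuple[str | None, str]:
--     lowered = {column.lower(): column for column in columns}
--     for candidate in COMMON_TARGET_NAMES:
--         if candidate in lowered:
--             return lowered[candidate], f"common_name:{candidate}"
--     if columns:
--         return columns[-1], "last_column"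
--     return None, "unavailable"
-- ===== SOURCE B (Python) =====
-- COMMON_TARGET_NAMES = [
--     "target",
--     "label",
--     "class",
--     "y",
--     "outcome",
--     "response",
--     "churn",
--     "default",
--     "price",
--     "sale_price",
--     "revenue",
-- ]
--
-- def inferTargetWithoutGoal(columns: list[str]) -> tuple[str | None, str]:
--     # Single pass over the columns keeping the best-ranked match seen so far
--     # (rank = position in COMMON_TARGET_NAMES); on equal rank a later column
--     # overwrites the earlier one. No dict and no loop over candidates.
--     best = None  # (rank, lowercase candidate, original column)
--     for column in columns:
--         low = column.lower()
--         if low in COMMON_TARGET_NAMES: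
--             r = COMMON_TARGET_NAMES.index(low)
--             if best is None or r <= best[0]:
--                 best = (r, low, column)
--     if best is not None:
--         return best[2], f"common_name:{best[1]}"
--     if columns:
--         return columns[-1], "last_column"
--     return None, "unavailable"
-- ===== Notes on version B (the rewrite author's own statement) =====
-- stated objective: alternative
-- what changed: Instead of building a lowercase->column dict and looping over the candidate list, B makes a single pass over the columns with a best-rank accumulator (rank = candidate position, later columns win ties), so the candidate loop and the index structure both disappear.
import Mathlib
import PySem

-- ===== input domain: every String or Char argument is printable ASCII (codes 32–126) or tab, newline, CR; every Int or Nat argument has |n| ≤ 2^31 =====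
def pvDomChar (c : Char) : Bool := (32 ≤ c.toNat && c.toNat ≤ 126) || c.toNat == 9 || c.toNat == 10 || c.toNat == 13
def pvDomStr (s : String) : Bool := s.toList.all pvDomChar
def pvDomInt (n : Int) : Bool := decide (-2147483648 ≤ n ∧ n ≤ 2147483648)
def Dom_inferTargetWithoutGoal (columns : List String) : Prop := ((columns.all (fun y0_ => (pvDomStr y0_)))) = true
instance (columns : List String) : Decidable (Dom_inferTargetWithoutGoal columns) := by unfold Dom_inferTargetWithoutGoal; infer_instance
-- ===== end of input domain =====

-- B replaces A's lowercase->column dict plus candidate loop by a single pass over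
-- the columns with a best-rank accumulator (alternative decomposition, same cost class).

def commonTargetNames : List String :=
  ["target", "label", "class", "y", "outcome", "response", "churn",
   "default", "price", "sale_price", "revenue"]

-- ===== PORT A =====
-- for candidate in COMMON_TARGET_NAMES: if candidate in lowered: return lowered[candidate], f"common_name:{candidate}"
def inferA_loop (lowered : PySem.Dict String String) : List String → Option (Option String × String)
  | [] => none
  | cand :: rest =>
    if lowered.contains cand then some (lowered.get? cand, "common_name:" ++ cand)
    else inferA_loop lowered rest

def inferTargetWithoutGoal (columns : List String) : Option String × String :=
  let lowered := columns.foldl (fun d c => d.insert (PySem.Str.lower c) c) PySem.Dict.empty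
  match inferA_loop lowered commonTargetNames with
  | some r => r
  | none =>
    match columns.getLast? with
    | some last => (some last, "last_column")
    | none => (none, "unavailable")

-- ===== PORT B =====
-- `if low in COMMON_TARGET_NAMES: r = COMMON_TARGET_NAMES.index(low)` is ported
-- as one match on index? (some r exactly when the membership test succeeds).
def inferB_step (cands : List String) (best : Option (Nat × String × String))
    (column : String) : Option (Nat × String × String) :=
  let low := PySem.Str.lower column
  match PySem.List.index? cands low with
  | none => best
  | some r =>
    match best with
    | none => some (r, low, column)
    | some (r0, _, _) => if r ≤ r0 then some (r, low, column) else best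

def inferTargetWithoutGoal_alt (columns : List String) : Option String × String :=
  match columns.foldl (inferB_step commonTargetNames) none with
  | some (_, low, col) => (some col, "common_name:" ++ low)
  | none =>
    match columns.getLast? with
    | some last => (some last, "last_column")
    | none => (none, "unavailable")

-- ===== PRECONDITION & SPEC =====
def Spec_inferTargetWithoutGoal (columns : List String) (out : Option String × String) : Prop := out = inferTargetWithoutGoal_alt columns
instance (columns : List String) (out : Option String × String) : Decidable (Spec_inferTargetWithoutGoal columns out) := by unfold Spec_inferTargetWithoutGoal; infer_instance

-- ===== CLAIM (what is proved, stated in full; the proofs are below) =====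
def Claim_equal_inferTargetWithoutGoal : Prop := ∀ (columns : List String), Dom_inferTargetWithoutGoal columns → Spec_inferTargetWithoutGoal columns (inferTargetWithoutGoal columns)

-- ===== LEMMAS AND PROOFS =====

-- Proof-side middle form: A's dict+candidate loop rephrased as a per-candidate scan.
def scanLoop (columns : List String) : List String → Option (String × String)
  | [] => none
  | cand :: rest =>
    match columns.reverse.find? (fun c => PySem.Str.lower c == cand) with
    | some col => some (col, cand)
    | none => scanLoop columns rest

-- The folded dict's lookup is the last column whose lowercase equals the key.
lemma foldl_insert_get? (cols : List String) (d : PySem.Dict String String) (k : String) :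
    (cols.foldl (fun d c => d.insert (PySem.Str.lower c) c) d).get? k =
      match cols.reverse.find? (fun c => PySem.Str.lower c == k) with
      | some c => some c
      | none => d.get? k := by
  induction cols generalizing d with
  | nil => simp
  | cons c cs ih =>
    simp only [List.foldl_cons, List.reverse_cons, List.find?_append, ih]
    cases h : cs.reverse.find? (fun c => PySem.Str.lower c == k) with
    | some v => simp
    | none =>
      simp only [List.find?_singleton]
      rw [PySem.Dict.get?_insert]
      by_cases hk : PySem.Str.lower c = k
      · simp [hk]
      · simp [hk, Ne.symm hk]

-- A's candidate loop equals the per-candidate scan.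
lemma loopA_eq_scan (columns : List String) (cands : List String) :
    inferA_loop
        (columns.foldl (fun d c => d.insert (PySem.Str.lower c) c) PySem.Dict.empty) cands
      = (scanLoop columns cands).map (fun p => (some p.1, "common_name:" ++ p.2)) := by
  induction cands with
  | nil => simp [inferA_loop, scanLoop]
  | cons cand rest ih =>
    simp only [inferA_loop, scanLoop]
    rw [PySem.Dict.contains_eq_isSome_get?, foldl_insert_get? columns _ cand]
    cases h : columns.reverse.find? (fun c => PySem.Str.lower c == cand) with
    | some v => simp
    | none => simpa using ih

-- B's fold with candidate list (cand :: rest): either some column lowercases to cand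
-- (then rank 0, last such column wins), or the fold reduces to the one over rest.
lemma foldB_cons (cand : String) (rest : List String) (xs : List String) :
    xs.foldl (inferB_step (cand :: rest)) none =
      match xs.reverse.find? (fun c => PySem.Str.lower c == cand) with
      | some col => some (0, cand, col)
      | none => (xs.foldl (inferB_step rest) none).map (fun p => (p.1 + 1, p.2)) := by
  induction xs using List.reverseRecOn with
  | nil => simp
  | append_singleton xs c ih =>
    simp only [List.foldl_append, List.foldl_cons, List.foldl_nil, List.reverse_append,
      List.reverse_singleton, List.singleton_append, List.find?_cons, ih]
    by_cases hc : PySem.Str.lower c = cand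
    · -- new last element matches cand: overwrites any state (rank 0 ≤ anything)
      simp only [inferB_step, hc, PySem.List.index?_cons_self, beq_self_eq_true]
      cases h : xs.reverse.find? (fun x => PySem.Str.lower x == cand) with
      | some col => simp
      | none =>
        cases h2 : xs.foldl (inferB_step rest) none with
        | none => simp
        | some p => simp
    · have hbeq : (PySem.Str.lower c == cand) = false := by simp [hc]
      simp only [hbeq]
      have hne : cand ≠ PySem.Str.lower c := fun h => hc h.symm
      have hidx : PySem.List.index? (cand :: rest) (PySem.Str.lower c)
          = (PySem.List.index? rest (PySem.Str.lower c)).map (· + 1) :=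
        PySem.List.index?_cons_of_ne rest hne
      simp only [inferB_step, hidx]
      cases h : xs.reverse.find? (fun x => PySem.Str.lower x == cand) with
      | some col =>
        -- state is some (0, cand, col); c has rank ≥ 1 in cand::rest, never ≤ 0
        cases hr : PySem.List.index? rest (PySem.Str.lower c) with
        | none => simp
        | some r => simp
      | none =>
        cases hr : PySem.List.index? rest (PySem.Str.lower c) with
        | none => simp [inferB_step, hr]
        | some r =>
          cases h2 : xs.foldl (inferB_step rest) none with
          | none => simp [inferB_step, hr, h, h2]
          | some p =>
            obtain ⟨r0, low0, col0⟩ := p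
            simp only [inferB_step, hr, h2, Option.map_some]
            by_cases hle : r ≤ r0
            · simp [hle]
            · simp [hle]

-- fold with the empty candidate list stays none
lemma foldB_nil (xs : List String) :
    xs.foldl (inferB_step ([] : List String)) none = none := by
  induction xs using List.reverseRecOn with
  | nil => simp
  | append_singleton xs c ih => simp [List.foldl_append, inferB_step, ih]

-- the scan and B's fold render the same result
lemma scan_eq_foldB (cands xs : List String) :
    scanLoop xs cands = (xs.foldl (inferB_step cands) none).map (fun p => (p.2.2, p.2.1)) := by
  induction cands with
  | nil => simp [scanLoop, foldB_nil]
  | cons cand rest ih =>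
    simp only [scanLoop, foldB_cons]
    cases h : xs.reverse.find? (fun c => PySem.Str.lower c == cand) with
    | some col => simp
    | none =>
      cases h2 : xs.foldl (inferB_step rest) none with
      | none => simpa [h2] using ih
      | some p => simpa [h2] using ih

-- ===== VERDICT (by name: the statement is the Claim_ definition above) =====
theorem inferTargetWithoutGoal_spec : Claim_equal_inferTargetWithoutGoal := by
  intro columns _
  unfold Spec_inferTargetWithoutGoal inferTargetWithoutGoal inferTargetWithoutGoal_alt
  simp only [loopA_eq_scan, scan_eq_foldB commonTargetNames columns]
  cases h : columns.foldl (inferB_step commonTargetNames) none with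
  | none => simp
  | some p => simp
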